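-- pv_equiv track=rewrite | github.com/ludobegins/web-scraping | contatos_usinas_cana_selenium.py | add_blank_contacts
-- ===== SOURCE A (Python) =====
-- def add_blank_contacts(cont_list):
--     for i in range(0, len(cont_list)):
--         if i % 3 == 0:
--             if "Site" in cont_list[i]:
--                 pass
--             else:
--                 cont_list.insert(i,"Site:")
--         elif (i-1) % 3 == 0:
--             if "Email" in cont_list[i]:
--                 pass
--             else:
--                 cont_list.insert(i,"Email:")
--         else:
--             if "Tel" in cont_list[i]:
--                 pass
--             else:
--                 cont_list.insert(i,"Telefone:")
--     return cont_list
-- ===== SOURCE B (Python) =====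
-- def add_blank_contacts(cont_list):
--     # Single forward pass with a pointer into the original elements; rebuilds
--     # the list and writes it back in place (same mutation as A).
--     SLOT = [("Site", "Site:"), ("Email", "Email:"), ("Tel", "Telefone:")]
--     orig = list(cont_list)
--     out = []
--     p = 0
--     for i in range(len(orig)):
--         kw, label = SLOT[i % 3]
--         if kw in orig[p]:
--             out.append(orig[p])
--             p += 1
--         else:
--             out.append(label)
--     out.extend(orig[p:])
--     cont_list[:] = out
--     return cont_list
-- ===== Notes on version B (the rewrite author's own statement) =====
-- stated objective: faster
-- what changed: Replaces A's repeated mid-list insert() calls (each shifting the tail) with a single forward pass that keeps a pointer into the original elements and rebuilds the list once, writing it back in place.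
import Mathlib
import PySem

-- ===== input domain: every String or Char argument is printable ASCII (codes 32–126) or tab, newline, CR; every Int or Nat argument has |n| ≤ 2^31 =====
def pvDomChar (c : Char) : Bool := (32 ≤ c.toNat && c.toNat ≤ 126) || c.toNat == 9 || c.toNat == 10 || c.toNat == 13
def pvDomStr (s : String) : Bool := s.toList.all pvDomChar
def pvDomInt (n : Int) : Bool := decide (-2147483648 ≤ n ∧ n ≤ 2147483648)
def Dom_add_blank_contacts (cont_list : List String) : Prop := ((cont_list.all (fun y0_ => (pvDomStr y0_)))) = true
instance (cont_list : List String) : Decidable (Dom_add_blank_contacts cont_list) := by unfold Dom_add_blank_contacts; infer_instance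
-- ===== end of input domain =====

-- B replaces A's repeated mid-list insertions with one forward pass and a
-- pointer into the original elements (objective: faster, constant-factor).
-- Both A and B mutate the argument in place in Python; the equivalence proved
-- here is about the return value.

-- ===== PORT A =====
-- one iteration of A's loop: index i into the current (mutating) list
def abcStepA (l : List String) (i : Int) : List String :=
  if PySem.Int.mod i 3 == 0 then
    if PySem.Str.isIn "Site" ((PySem.List.pyGet? l i).getD "") then l
    else PySem.List.insert l i "Site:"
  else if PySem.Int.mod (i - 1) 3 == 0 then
    if PySem.Str.isIn "Email" ((PySem.List.pyGet? l i).getD "") then l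
    else PySem.List.insert l i "Email:"
  else
    if PySem.Str.isIn "Tel" ((PySem.List.pyGet? l i).getD "") then l
    else PySem.List.insert l i "Telefone:"

def add_blank_contacts (cont_list : List String) : List String :=
  (PySem.List.pyRange 0 (cont_list.length : Int) 1).foldl abcStepA cont_list

-- ===== PORT B =====
-- slot table: (keyword, placeholder label) for i % 3 = 0, 1, 2
def abcSlot : List (String × String) :=
  [("Site", "Site:"), ("Email", "Email:"), ("Tel", "Telefone:")]

-- one iteration of B's loop: state (out, p), p a pointer into orig
def abcStepB (orig : List String) (st : List String × Int) (i : Int) :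
    List String × Int :=
  let kl := (PySem.List.pyGet? abcSlot (PySem.Int.mod i 3)).getD ("", "")
  let cur := (PySem.List.pyGet? orig st.2).getD ""
  if PySem.Str.isIn kl.1 cur then (st.1 ++ [cur], st.2 + 1)
  else (st.1 ++ [kl.2], st.2)

def add_blank_contacts_alt (cont_list : List String) : List String :=
  let st := (PySem.List.pyRange 0 (cont_list.length : Int) 1).foldl
      (abcStepB cont_list) ([], 0)
  st.1 ++ PySem.List.slice cont_list (some st.2) none

-- ===== PRECONDITION & SPEC =====
def Spec_add_blank_contacts (cont_list : List String) (out : List String) : Prop := out = add_blank_contacts_alt cont_list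
instance (cont_list : List String) (out : List String) : Decidable (Spec_add_blank_contacts cont_list out) := by unfold Spec_add_blank_contacts; infer_instance

-- ===== CLAIM (what is proved, stated in full; the proofs are below) =====
def Claim_equal_add_blank_contacts : Prop := ∀ (cont_list : List String), Dom_add_blank_contacts cont_list → Spec_add_blank_contacts cont_list (add_blank_contacts cont_list)

-- ===== LEMMAS AND PROOFS =====

-- final assembly of B's state into the result list (proof-only helper)
def abcFin (orig : List String) (st : List String × Int) : List String :=
  st.1 ++ orig.drop st.2.toNat

lemma abcFold_snd_nonneg (orig : List String) (idxs : List Int) :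
    ∀ st : List String × Int, 0 ≤ st.2 →
      0 ≤ (idxs.foldl (abcStepB orig) st).2 := by
  induction idxs with
  | nil => intro st h; exact h
  | cons i t ih =>
    intro st h
    simp only [List.foldl_cons]
    apply ih
    simp only [abcStepB]
    split <;> simp <;> omega

lemma abc_key (orig : List String) :
    ∀ (k : Nat) (out : List String) (p : Nat), p ≤ out.length →
      out.length + k = orig.length →
      (PySem.List.pyRange (out.length : Int) (orig.length : Int) 1).foldl
          abcStepA (out ++ orig.drop p)
        = abcFin orig
            ((PySem.List.pyRange (out.length : Int) (orig.length : Int) 1).foldl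
              (abcStepB orig) (out, (p : Int))) := by
  intro k
  induction k with
  | zero =>
    intro out p hp hlen
    rw [PySem.List.pyRange_one_eq_nil (by omega)]
    simp [abcFin]
  | succ k ih =>
    intro out p hp hlen
    have hil : out.length < orig.length := by omega
    have hpl : p < orig.length := by omega
    rw [PySem.List.pyRange_one_cons (by exact_mod_cast hil)]
    simp only [List.foldl_cons]
    have hdrop : orig.drop p = orig[p] :: orig.drop (p + 1) :=
      List.drop_eq_getElem_cons hpl
    have hgetA : PySem.List.pyGet? (out ++ orig.drop p) (out.length : Int)
        = some orig[p] := by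
      rw [hdrop]; apply PySem.List.pyGet?_append_length
    have hgetB : PySem.List.pyGet? orig ((p : Nat) : Int) = some orig[p] := by
      rw [PySem.List.pyGet?_natCast]; simp
    have hmod : PySem.Int.mod ((out.length : Nat) : Int) 3
        = ((out.length % 3 : Nat) : Int) := by
      exact_mod_cast PySem.Int.mod_natCast out.length 3
    have h3 : out.length % 3 = 0 ∨ out.length % 3 = 1 ∨ out.length % 3 = 2 := by
      omega
    -- shape after keeping the element / inserting a label
    have hkeep : out ++ orig.drop p = (out ++ [orig[p]]) ++ orig.drop (p + 1) := by
      rw [hdrop]; simp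
    have hins : ∀ lab : String,
        PySem.List.insert (out ++ orig.drop p) ((out.length : Nat) : Int) lab
          = (out ++ [lab]) ++ orig.drop p := by
      intro lab
      rw [PySem.List.insert_natCast _ _ _ (by simp)]
      rw [List.take_left, List.drop_left]
      simp
    have ihkeep := ih (out ++ [orig[p]]) (p + 1) (by simp; omega) (by simp; omega)
    have ihins : ∀ lab : String,
        (PySem.List.pyRange ((out.length + 1 : Nat) : Int) (orig.length : Int) 1).foldl
            abcStepA ((out ++ [lab]) ++ orig.drop p)
          = abcFin orig
              ((PySem.List.pyRange ((out.length + 1 : Nat) : Int) (orig.length : Int) 1).foldl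
                (abcStepB orig) (out ++ [lab], (p : Int))) := by
      intro lab
      have := ih (out ++ [lab]) p (by simp; omega) (by simp; omega)
      simpa using this
    rcases h3 with h | h | h
    · -- slot 0 : Site
      simp only [abcStepA, abcStepB, hgetA, hgetB, hmod, h]
      simp only [abcSlot, Option.getD_some]
      norm_num
      by_cases hkw : PySem.Chars.isIn "Site".toList orig[p].toList = true
      · rw [if_pos hkw, if_pos hkw, hkeep]; simpa using ihkeep
      · rw [if_neg hkw, if_neg hkw, hins "Site:"]; simpa using ihins "Site:"
    · -- slot 1 : Email
      have hsub : ((out.length : Nat) : Int) - 1 = ((out.length - 1 : Nat) : Int) := by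
        omega
      have hm2 : PySem.Int.mod (((out.length : Nat) : Int) - 1) 3
          = ((out.length - 1) % 3 : Nat) := by
        rw [hsub]; exact_mod_cast PySem.Int.mod_natCast (out.length - 1) 3
      have hc2 : (PySem.Int.mod (((out.length : Nat) : Int) - 1) 3 == 0) = true := by
        have h0 : (out.length - 1) % 3 = 0 := by omega
        rw [hm2, h0]; simp
      simp only [abcStepA, abcStepB, hc2, hgetA, hgetB, hmod, h]
      simp only [abcSlot, Option.getD_some]
      norm_num
      by_cases hkw : PySem.Chars.isIn "Email".toList orig[p].toList = true
      · rw [if_pos hkw, if_pos hkw, hkeep]; simpa using ihkeep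
      · rw [if_neg hkw, if_neg hkw, hins "Email:"]; simpa using ihins "Email:"
    · -- slot 2 : Tel
      have hsub : ((out.length : Nat) : Int) - 1 = ((out.length - 1 : Nat) : Int) := by
        omega
      have hm2 : PySem.Int.mod (((out.length : Nat) : Int) - 1) 3
          = ((out.length - 1) % 3 : Nat) := by
        rw [hsub]; exact_mod_cast PySem.Int.mod_natCast (out.length - 1) 3
      have hc2 : (PySem.Int.mod (((out.length : Nat) : Int) - 1) 3 == 0) = false := by
        have h0 : (out.length - 1) % 3 = 1 := by omega
        rw [hm2, h0]; decide
      simp only [abcStepA, abcStepB, hc2, hgetA, hgetB, hmod, h]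
      simp only [abcSlot, Option.getD_some]
      norm_num
      simp only [show (2 : Int).toNat = 2 from rfl, List.getElem_cons_succ,
        List.getElem_cons_zero]
      by_cases hkw : PySem.Chars.isIn "Tel".toList orig[p].toList = true
      · rw [if_pos hkw, if_pos hkw, hkeep]; simpa using ihkeep
      · rw [if_neg hkw, if_neg hkw, hins "Telefone:"]; simpa using ihins "Telefone:"

-- ===== VERDICT (by name: the statement is the Claim_ definition above) =====
theorem add_blank_contacts_spec : Claim_equal_add_blank_contacts := by
  intro l _hd
  unfold Spec_add_blank_contacts add_blank_contacts add_blank_contacts_alt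
  have h := abc_key l l.length [] 0 (by simp) (by simp)
  have hnn := abcFold_snd_nonneg l
      (PySem.List.pyRange 0 (l.length : Int) 1) ([], 0) (by norm_num)
  simp only [List.length_nil, Nat.cast_zero, List.nil_append, List.drop_zero] at h
  refine h.trans ?_
  unfold abcFin
  exact congrArg
    (fun t => (List.foldl (abcStepB l) ([], 0)
      (PySem.List.pyRange 0 (l.length : Int) 1)).1 ++ t)
    (PySem.List.slice_from l hnn).symm
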